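-- pv_equiv track=rewrite | github.com/camila-2301/EXAMEN-FINAL-PYTHON | TRABAJO FINAL ADRIANA ARANIBAR PYTHON/ARCHIVOS PYTHON/MODULO3/credit.py | prob5
-- ===== SOURCE A (Python) =====
-- def prob5(numero):
--
-- 	AMEX = [34, 37]
-- 	MASTERCARD = [51, 52, 53, 54 , 55]
--
-- 	def convert(numero2):
-- 		lista = [ int(x) for x in list(str(numero2)) ]
-- 		return sum(lista)
--
-- 	num = str(numero)
-- 	size = len(num)
-- 	suma = 0
-- 	for i in range(size-2, -1, -2):
-- 		suma += convert(int(num[i])*2)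
-- 	for i in range(size-1, -1, -2):
-- 		suma += int(num[i])
--
-- 	if suma % 10 == 0:
-- 		if int(num[0]) == 4:
-- 			return "VISA"
-- 		elif int(num[0:2]) in AMEX:
-- 			return "AMEX"
-- 		elif int(num[0:2]) in MASTERCARD:
-- 			return "MASTERCARD"
-- 	return "INVALID"
-- ===== SOURCE B (Python) =====
-- def prob5(numero):
--     # Pure integer arithmetic: no string conversion anywhere.
--     # Luhn checksum by divmod digit extraction with a precomputed doubled-digit table,
--     # prefix classification by dividing down to the leading one/two digits.
--     DOUBLED = (0, 2, 4, 6, 8, 1, 3, 5, 7, 9)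
--     n, suma, double = numero, 0, False
--     while n:
--         n, d = divmod(n, 10)
--         suma += DOUBLED[d] if double else d
--         double = not double
--     if suma % 10 == 0:
--         p = numero
--         while p >= 100:
--             p //= 10
--         first = p if p < 10 else p // 10
--         if first == 4:
--             return "VISA"
--         if p in (34, 37):
--             return "AMEX"
--         if 51 <= p <= 55:
--             return "MASTERCARD"
--     return "INVALID"
-- ===== Notes on version B (the rewrite author's own statement) =====
-- stated objective: alternative
-- what changed: B never builds a decimal string: it computes the Luhn checksum by divmod digit extraction with a precomputed doubled-digit lookup table (replacing A's str() conversion, backward index loops and the str-round-trip digit-sum helper), and classifies the prefix by integer division down to the leading one/two digits instead of slicing and re-parsing the string.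
import Mathlib
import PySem

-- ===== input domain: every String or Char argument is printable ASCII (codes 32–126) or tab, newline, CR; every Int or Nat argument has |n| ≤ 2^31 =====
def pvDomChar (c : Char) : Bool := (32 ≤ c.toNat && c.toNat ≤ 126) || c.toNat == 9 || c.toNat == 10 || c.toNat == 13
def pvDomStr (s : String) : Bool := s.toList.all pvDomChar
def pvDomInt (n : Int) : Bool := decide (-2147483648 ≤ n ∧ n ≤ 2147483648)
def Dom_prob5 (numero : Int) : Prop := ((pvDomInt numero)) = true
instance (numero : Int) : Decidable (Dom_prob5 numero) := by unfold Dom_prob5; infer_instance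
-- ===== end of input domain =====

-- B drops all string processing: Luhn checksum by divmod digit extraction with a doubled-digit
-- lookup table, and prefix classification by integer division (objective: alternative).


-- ===== PORT A =====
-- int(num[i]) : num[i] (IndexError = none) parsed by int() (ValueError = none); defaults excluded by Pre_
def pvIntAtA (num : List Char) (i : Int) : Int :=
  ((PySem.List.pyGet? num i).bind (fun c => PySem.Int.ofChars? [c])).getD 0

-- convert(numero2) = sum([int(x) for x in list(str(numero2))])
def pvConvertA (numero2 : Int) : Int :=
  ((PySem.Int.toChars numero2).map (fun x => (PySem.Int.ofChars? [x]).getD 0)).sum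

def prob5 (numero : Int) : String :=
  let AMEX : List Int := [34, 37]
  let MASTERCARD : List Int := [51, 52, 53, 54, 55]
  let num := PySem.Int.toChars numero
  let size : Int := PySem.List.len num
  let suma : Int := (PySem.List.pyRange (size - 2) (-1) (-2)).foldl
    (fun suma i => suma + pvConvertA (pvIntAtA num i * 2)) 0
  let suma : Int := (PySem.List.pyRange (size - 1) (-1) (-2)).foldl
    (fun suma i => suma + pvIntAtA num i) suma
  if PySem.Int.mod suma 10 = 0 then
    if pvIntAtA num 0 = 4 then "VISA"
    else if AMEX.contains ((PySem.Int.ofChars? (PySem.List.slice num (some 0) (some 2))).getD 0) then "AMEX"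
    else if MASTERCARD.contains ((PySem.Int.ofChars? (PySem.List.slice num (some 0) (some 2))).getD 0) then "MASTERCARD"
    else "INVALID"
  else "INVALID"

-- ===== PORT B =====
-- DOUBLED = (0, 2, 4, 6, 8, 1, 3, 5, 7, 9)
def pvDoubled : List Int := [0, 2, 4, 6, 8, 1, 3, 5, 7, 9]

-- 'while n: n, d = divmod(n, 10); suma += DOUBLED[d] if double else d; double = not double'.
-- Ported on n.toNat: exact for numero ≥ 0 (= Pre_), where Python's divmod agrees with Nat
-- division; the DOUBLED[d] index d = n % 10 is always in range, so getD is exact.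
def pvLuhnLoopB (n : Nat) (suma : Int) (dbl : Bool) : Int :=
  if h : n = 0 then suma
  else pvLuhnLoopB (n / 10)
        (suma + (if dbl then pvDoubled.getD (n % 10) 0 else ((n % 10 : Nat) : Int))) (!dbl)
  termination_by n
  decreasing_by exact Nat.div_lt_self (Nat.pos_of_ne_zero h) (by norm_num)

-- 'p = numero; while p >= 100: p //= 10' (exact for numero ≥ 0, as above)
def pvPrefixLoopB (p : Nat) : Nat :=
  if h : 100 ≤ p then pvPrefixLoopB (p / 10) else p
  termination_by p
  decreasing_by exact Nat.div_lt_self (by omega) (by norm_num)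

def prob5_alt (numero : Int) : String :=
  let suma := pvLuhnLoopB numero.toNat 0 false
  if PySem.Int.mod suma 10 = 0 then
    let p := pvPrefixLoopB numero.toNat
    let first := if p < 10 then p else p / 10
    if first = 4 then "VISA"
    else if p = 34 ∨ p = 37 then "AMEX"
    else if 51 ≤ p ∧ p ≤ 55 then "MASTERCARD"
    else "INVALID"
  else "INVALID"

-- ===== PRECONDITION & SPEC =====
-- Pre_ excludes negative numero: there str(numero) carries '-' and A raises ValueError at int('-').
def Pre_prob5 (numero : Int) : Prop := 0 ≤ numero
instance (numero : Int) : Decidable (Pre_prob5 numero) := by unfold Pre_prob5; infer_instance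
def pvWitness_prob5 : Int := (34)

def Spec_prob5 (numero : Int) (out : String) : Prop := out = prob5_alt numero
instance (numero : Int) (out : String) : Decidable (Spec_prob5 numero out) := by unfold Spec_prob5; infer_instance

-- ===== CLAIM (what is proved, stated in full; the proofs are below) =====
def Claim_equal_prob5 : Prop := ∀ (numero : Int), Dom_prob5 numero → Pre_prob5 numero → Spec_prob5 numero (prob5 numero)

-- ===== LEMMAS AND PROOFS =====

-- the ten decimal digit characters
def pvDigits : List Char := ['0','1','2','3','4','5','6','7','8','9']

-- int of a single char, A's per-character value
def pvVal (c : Char) : Int := (PySem.Int.ofChars? [c]).getD 0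

-- Luhn weight of a digit string read least-significant-first, alternating with position parity
def pvMsum : Int → List Char → Int
  | _, [] => 0
  | s, c :: r =>
      (if PySem.Int.mod s 2 = 1 then
        (if pvVal c * 2 > 9 then pvVal c * 2 - 9 else pvVal c * 2)
       else pvVal c) + pvMsum (s + 1) r

lemma pvMsum_parity (r : List Char) : ∀ s t : Int, PySem.Int.mod s 2 = PySem.Int.mod t 2 →
    pvMsum s r = pvMsum t r := by
  induction r with
  | nil => intro s t _; rfl
  | cons c r ih =>
      intro s t h
      simp only [pvMsum, h]
      rw [ih (s+1) (t+1) (by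
        simp only [PySem.Int.mod_eq_emod_of_pos (by norm_num : (0:Int) < 2)] at h ⊢
        omega)]

lemma pvRange2_cons (a : Int) (h : 0 ≤ a) :
    PySem.List.pyRange a (-1) (-2) = a :: PySem.List.pyRange (a - 2) (-1) (-2) := by
  unfold PySem.List.pyRange
  rw [if_neg (by norm_num), if_neg (by norm_num), if_pos (by omega : (-1:Int) < a)]
  rw [if_neg (by norm_num), if_neg (by norm_num)]
  simp only [neg_neg]
  by_cases h2 : (-1:Int) < a - 2
  · rw [if_pos h2]
    have hc : ((a - -1 + 2 - 1)/2).toNat = ((a - 2 - -1 + 2 - 1)/2).toNat + 1 := by omega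
    rw [hc, List.range_succ_eq_map, List.map_cons, List.map_map]
    refine congrArg₂ _ (by ring) (List.map_congr_left ?_)
    intro k _
    simp [Function.comp]
    ring
  · rw [if_neg h2]
    have hc : ((a - -1 + 2 - 1)/2).toNat = 1 := by omega
    rw [hc]
    simp

lemma pvMem_range2 (a i : Int) (h : i ∈ PySem.List.pyRange a (-1) (-2)) : 0 ≤ i ∧ i ≤ a := by
  unfold PySem.List.pyRange at h
  rw [if_neg (by norm_num), if_neg (by norm_num)] at h
  simp only [neg_neg] at h
  by_cases h1 : (-1:Int) < a
  · rw [if_pos h1] at h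
    obtain ⟨k, hk, rfl⟩ := List.mem_map.1 h
    rw [List.mem_range] at hk
    have : (k:Int) < (a - -1 + 2 - 1)/2 := by omega
    omega
  · rw [if_neg h1] at h
    simp at h

lemma pvDigitChar_mem (m : Nat) (h : m < 10) : Nat.digitChar m ∈ pvDigits := by
  interval_cases m <;> decide

lemma pvToDigitsCore_digits (f : Nat) : ∀ (n : Nat) (l : List Char), (∀ c ∈ l, c ∈ pvDigits) →
    ∀ c ∈ Nat.toDigitsCore 10 f n l, c ∈ pvDigits := by
  induction f with
  | zero => intro n l hl; simpa [Nat.toDigitsCore] using hl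
  | succ f ih =>
      intro n l hl c hc
      rw [Nat.toDigitsCore] at hc
      have hd : (n % 10).digitChar ∈ pvDigits := pvDigitChar_mem _ (Nat.mod_lt _ (by norm_num))
      by_cases h0 : n / 10 = 0
      · simp only [h0, if_pos] at hc
        rcases List.mem_cons.1 hc with rfl | hc
        · exact hd
        · exact hl _ hc
      · simp only [if_neg h0] at hc
        exact ih _ _ (by intro c' hc'; rcases List.mem_cons.1 hc' with rfl | hc'; exacts [hd, hl _ hc']) c hc

lemma pvToChars_digits (n : Int) (h : 0 ≤ n) : ∀ c ∈ PySem.Int.toChars n, c ∈ pvDigits := by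
  unfold PySem.Int.toChars
  rw [if_neg (by omega)]
  exact pvToDigitsCore_digits _ _ _ (by simp)

lemma pvVal_digit_convert (c : Char) (h : c ∈ pvDigits) :
    pvConvertA (pvVal c * 2) = (if pvVal c * 2 > 9 then pvVal c * 2 - 9 else pvVal c * 2) := by
  fin_cases h <;> decide

lemma pvIntAtA_append_last (ds : List Char) (c : Char) :
    pvIntAtA (ds ++ [c]) (ds.length : Int) = pvVal c := by
  simp [pvIntAtA, pvVal, pysem]

lemma pvIntAtA_append_lt (ds : List Char) (c : Char) (i : Int) (h0 : 0 ≤ i) (h : i < ds.length) :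
    pvIntAtA (ds ++ [c]) i = pvIntAtA ds i := by
  obtain ⟨k, rfl⟩ : ∃ k : Nat, i = (k : Int) := ⟨i.toNat, by omega⟩
  have hk : k < ds.length := by exact_mod_cast h
  simp [pvIntAtA, pysem, List.getElem?_append_left hk]

-- A's two loop sums, as map-sums
def pvA1 (ds : List Char) : Int :=
  ((PySem.List.pyRange ((ds.length : Int) - 2) (-1) (-2)).map (fun i => pvConvertA (pvIntAtA ds i * 2))).sum
def pvA2 (ds : List Char) : Int :=
  ((PySem.List.pyRange ((ds.length : Int) - 1) (-1) (-2)).map (fun i => pvIntAtA ds i)).sum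
-- and the parity-swapped pair
def pvA1' (ds : List Char) : Int :=
  ((PySem.List.pyRange ((ds.length : Int) - 2) (-1) (-2)).map (fun i => pvIntAtA ds i)).sum
def pvA2' (ds : List Char) : Int :=
  ((PySem.List.pyRange ((ds.length : Int) - 1) (-1) (-2)).map (fun i => pvConvertA (pvIntAtA ds i * 2))).sum

lemma pvA_eq_msum (ds : List Char) (hd : ∀ c ∈ ds, c ∈ pvDigits) :
    pvA1 ds + pvA2 ds = pvMsum 0 ds.reverse ∧ pvA1' ds + pvA2' ds = pvMsum 1 ds.reverse := by
  induction ds using List.reverseRecOn with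
  | nil => exact ⟨by decide, by decide⟩
  | append_singleton ds c ih =>
      have hds : ∀ c' ∈ ds, c' ∈ pvDigits := fun c' hc' => hd c' (List.mem_append_left _ hc')
      have hc : c ∈ pvDigits := hd c (List.mem_append_right _ (List.mem_singleton_self c))
      have ih := ih hds
      have hshift : ∀ (b : Int), 1 ≤ b → ∀ (f : Int → Int), ((PySem.List.pyRange ((ds.length : Int) - b) (-1) (-2)).map
          (fun i => f (pvIntAtA (ds ++ [c]) i))).sum =
          ((PySem.List.pyRange ((ds.length : Int) - b) (-1) (-2)).map (fun i => f (pvIntAtA ds i))).sum := by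
        intro b hb f
        refine congrArg _ (List.map_congr_left ?_)
        intro i hi
        obtain ⟨h0, h1⟩ := pvMem_range2 _ _ hi
        rw [pvIntAtA_append_lt ds c i h0 (by omega)]
      have e1 : pvA1 (ds ++ [c]) = pvA2' ds := by
        unfold pvA1 pvA2'
        have harg : ((ds ++ [c]).length : Int) - 2 = (ds.length : Int) - 1 := by simp [List.length_append]; try omega
        rw [harg]
        exact hshift 1 (by norm_num) (fun d => pvConvertA (d * 2))
      have e2 : pvA2 (ds ++ [c]) = pvVal c + pvA1' ds := by
        unfold pvA2 pvA1'
        have harg : ((ds ++ [c]).length : Int) - 1 = (ds.length : Int) := by simp [List.length_append]; try omega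
        rw [harg, pvRange2_cons _ (by positivity), List.map_cons, List.sum_cons, pvIntAtA_append_last]
        have := hshift 2 (by norm_num) id
        simp only [id] at this
        rw [this]
      have e1' : pvA1' (ds ++ [c]) = pvA2 ds := by
        unfold pvA1' pvA2
        have harg : ((ds ++ [c]).length : Int) - 2 = (ds.length : Int) - 1 := by simp [List.length_append]; try omega
        rw [harg]
        have := hshift 1 (by norm_num) id
        simp only [id] at this
        rw [this]
      have e2' : pvA2' (ds ++ [c]) = pvConvertA (pvVal c * 2) + pvA1 ds := by
        unfold pvA2' pvA1
        have harg : ((ds ++ [c]).length : Int) - 1 = (ds.length : Int) := by simp [List.length_append]; try omega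
        rw [harg, pvRange2_cons _ (by positivity), List.map_cons, List.sum_cons, pvIntAtA_append_last]
        rw [hshift 2 (by norm_num) (fun d => pvConvertA (d * 2))]
      have hrev : (ds ++ [c]).reverse = c :: ds.reverse := by simp
      constructor
      · rw [e1, e2, hrev, pvMsum, if_neg (by decide), (by norm_num : (0:Int) + 1 = 1)]
        omega
      · rw [e1', e2', hrev, pvMsum, if_pos (by decide)]
        rw [pvMsum_parity ds.reverse (1 + 1) 0 (by decide)]
        rw [pvVal_digit_convert c hc]
        omega

lemma pvSuma_eq (numero : Int) (h : 0 ≤ numero) :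
    (PySem.List.pyRange ((PySem.List.len (PySem.Int.toChars numero)) - 1) (-1) (-2)).foldl
      (fun suma i => suma + pvIntAtA (PySem.Int.toChars numero) i)
      ((PySem.List.pyRange ((PySem.List.len (PySem.Int.toChars numero)) - 2) (-1) (-2)).foldl
        (fun suma i => suma + pvConvertA (pvIntAtA (PySem.Int.toChars numero) i * 2)) 0)
    = pvMsum 0 (PySem.Int.toChars numero).reverse := by
  rw [PySem.List.foldl_add, PySem.List.foldl_add, PySem.List.len_eq]
  have hm := pvA_eq_msum (PySem.Int.toChars numero) (pvToChars_digits numero h)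
  unfold pvA1 pvA2 at hm
  rw [zero_add]
  exact hm.1

-- ---- decimal-string structure of Nat.toDigits ----

lemma pvTDC_acc (f : Nat) : ∀ (n : Nat) (l : List Char),
    Nat.toDigitsCore 10 f n l = Nat.toDigitsCore 10 f n [] ++ l := by
  induction f with
  | zero => intro n l; simp [Nat.toDigitsCore]
  | succ f ih =>
      intro n l
      rw [Nat.toDigitsCore, Nat.toDigitsCore]
      by_cases h0 : n / 10 = 0
      · simp [h0]
      · rw [if_neg h0, if_neg h0, ih (n/10) ((n % 10).digitChar :: l), ih (n/10) [(n % 10).digitChar]]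
        simp

lemma pvTDC_fuel : ∀ (f f' n : Nat), n < f → n < f' →
    Nat.toDigitsCore 10 f n [] = Nat.toDigitsCore 10 f' n [] := by
  intro f
  induction f with
  | zero => intro f' n h; omega
  | succ f ih =>
      intro f' n h h'
      cases f' with
      | zero => omega
      | succ f' =>
          rw [Nat.toDigitsCore, Nat.toDigitsCore]
          by_cases h0 : n / 10 = 0
          · simp [h0]
          · rw [if_neg h0, if_neg h0, pvTDC_acc, pvTDC_acc f']
            have hlt : n / 10 < n := Nat.div_lt_self (by omega) (by norm_num)
            rw [ih f' (n/10) (by omega) (by omega)]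

lemma pvToDigits_lt (n : Nat) (h : n < 10) : Nat.toDigits 10 n = [Nat.digitChar n] := by
  rw [Nat.toDigits, Nat.toDigitsCore]
  rw [if_pos (by omega : n / 10 = 0), Nat.mod_eq_of_lt h]

lemma pvToDigits_step (n : Nat) (h : 10 ≤ n) :
    Nat.toDigits 10 n = Nat.toDigits 10 (n / 10) ++ [Nat.digitChar (n % 10)] := by
  rw [Nat.toDigits, Nat.toDigitsCore, if_neg (by omega : ¬ n / 10 = 0), pvTDC_acc]
  rw [Nat.toDigits, pvTDC_fuel n (n/10+1) (n/10) (Nat.div_lt_self (by omega) (by norm_num)) (by omega)]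

lemma pvToDigits_len1 (n : Nat) : 1 ≤ (Nat.toDigits 10 n).length := by
  by_cases h : n < 10
  · rw [pvToDigits_lt n h]; simp
  · rw [pvToDigits_step n (by omega)]; simp

lemma pvToDigits_len2 (n : Nat) (h : 10 ≤ n) : 2 ≤ (Nat.toDigits 10 n).length := by
  rw [pvToDigits_step n h]
  have := pvToDigits_len1 (n/10)
  simp
  omega

lemma pvToChars_nonneg (n : Int) (h : 0 ≤ n) :
    PySem.Int.toChars n = Nat.toDigits 10 n.toNat := by
  unfold PySem.Int.toChars; rw [if_neg (by omega)]

-- ---- checksum bridge ----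

lemma pvVal_digitChar (d : Nat) (h : d < 10) : pvVal (Nat.digitChar d) = (d : Int) := by
  interval_cases d <;> decide

lemma pvDoubled_eq (d : Nat) (h : d < 10) :
    pvDoubled.getD d 0 = (if (d:Int) * 2 > 9 then (d:Int) * 2 - 9 else (d:Int) * 2) := by
  interval_cases d <;> decide

lemma pvWeight_eq (d : Nat) (hd : d < 10) (s : Int) (dbl : Bool)
    (hp : PySem.Int.mod s 2 = 1 ↔ dbl = true) :
    (if PySem.Int.mod s 2 = 1 then
        (if pvVal (Nat.digitChar d) * 2 > 9 then pvVal (Nat.digitChar d) * 2 - 9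
         else pvVal (Nat.digitChar d) * 2)
     else pvVal (Nat.digitChar d))
    = (if dbl then pvDoubled.getD d 0 else (d : Int)) := by
  rw [pvVal_digitChar d hd, pvDoubled_eq d hd]
  cases dbl
  · have hno : ¬ PySem.Int.mod s 2 = 1 := by simp_all
    rw [if_neg hno, if_neg (by norm_num : ¬ (false = true))]
  · have hyes : PySem.Int.mod s 2 = 1 := hp.mpr rfl
    rw [if_pos hyes, if_pos rfl]

lemma pvLuhn_acc (n : Nat) : ∀ (a : Int) (dbl : Bool), pvLuhnLoopB n a dbl = a + pvLuhnLoopB n 0 dbl := by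
  induction n using Nat.strong_induction_on with
  | _ n ih =>
      intro a dbl
      by_cases h : n = 0
      · subst h
        conv_lhs => rw [pvLuhnLoopB.eq_def]
        conv_rhs => rw [pvLuhnLoopB.eq_def]
        norm_num
      · have hlt : n / 10 < n := Nat.div_lt_self (by omega) (by norm_num)
        conv_lhs => rw [pvLuhnLoopB.eq_def]
        conv_rhs => rw [pvLuhnLoopB.eq_def]
        rw [dif_neg h, dif_neg h, ih (n/10) hlt, ih (n/10) hlt (0 + _)]
        ring

lemma pvMsum_luhn (n : Nat) : ∀ (s : Int) (dbl : Bool),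
    (PySem.Int.mod s 2 = 1 ↔ dbl = true) →
    pvMsum s (Nat.toDigits 10 n).reverse = pvLuhnLoopB n 0 dbl := by
  induction n using Nat.strong_induction_on with
  | _ n ih =>
      intro s dbl hp
      by_cases h0 : n = 0
      · subst h0
        rw [pvToDigits_lt 0 (by norm_num), List.reverse_singleton]
        rw [pvLuhnLoopB.eq_def, dif_pos rfl]
        simp only [pvMsum, show pvVal (Nat.digitChar 0) = (0:Int) from by decide]
        norm_num
      · have hlt : n / 10 < n := Nat.div_lt_self (by omega) (by norm_num)
        have hpar : PySem.Int.mod (s + 1) 2 = 1 ↔ (!dbl) = true := by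
          simp only [PySem.Int.mod_eq_emod_of_pos (by norm_num : (0:Int) < 2)] at hp ⊢
          cases dbl <;> simp_all <;> omega
        by_cases h10 : n < 10
        · rw [pvToDigits_lt n h10, List.reverse_singleton]
          rw [pvLuhnLoopB.eq_def, dif_neg h0, Nat.div_eq_of_lt h10, Nat.mod_eq_of_lt h10]
          rw [pvLuhnLoopB.eq_def, dif_pos rfl]
          simp only [pvMsum, add_zero, zero_add]
          exact pvWeight_eq n h10 s dbl hp
        · rw [pvToDigits_step n (by omega), List.reverse_append, List.reverse_singleton,
              List.singleton_append]
          rw [pvLuhnLoopB.eq_def, dif_neg h0, pvLuhn_acc (n/10)]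
          simp only [pvMsum]
          rw [ih (n/10) hlt (s+1) (!dbl) hpar,
              pvWeight_eq (n % 10) (Nat.mod_lt _ (by norm_num)) s dbl hp]
          ring

-- ---- prefix bridge ----

lemma pvRound2 : ∀ n : Nat, n < 100 → (PySem.Int.ofChars? (Nat.toDigits 10 n)).getD 0 = (n : Int) := by
  decide

lemma pvSlice2 (l : List Char) : PySem.List.slice l (some 0) (some 2) = l.take 2 := by
  rw [PySem.List.slice_zero_start]
  exact_mod_cast PySem.List.slice_to_natCast l 2

lemma pvPrefixA (n : Nat) :
    (PySem.Int.ofChars? (PySem.List.slice (Nat.toDigits 10 n) (some 0) (some 2))).getD 0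
      = (pvPrefixLoopB n : Int) := by
  induction n using Nat.strong_induction_on with
  | _ n ih =>
      by_cases h : 100 ≤ n
      · have hlt : n / 10 < n := Nat.div_lt_self (by omega) (by norm_num)
        conv_rhs => rw [pvPrefixLoopB.eq_def]
        rw [dif_pos h, pvSlice2, pvToDigits_step n (by omega),
            List.take_append_of_le_length (pvToDigits_len2 (n/10) (by omega)),
            ← pvSlice2, ih (n/10) hlt]
      · have hlen : (Nat.toDigits 10 n).length ≤ 2 := by
          by_cases h10 : n < 10
          · rw [pvToDigits_lt n h10]; simp
          · rw [pvToDigits_step n (by omega), pvToDigits_lt (n/10) (by omega)]; simp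
        conv_rhs => rw [pvPrefixLoopB.eq_def]
        rw [dif_neg h, pvSlice2, List.take_of_length_le hlen, pvRound2 n (by omega)]

lemma pvFirstA (n : Nat) :
    pvIntAtA (Nat.toDigits 10 n) 0
      = ((if pvPrefixLoopB n < 10 then pvPrefixLoopB n else pvPrefixLoopB n / 10 : Nat) : Int) := by
  induction n using Nat.strong_induction_on with
  | _ n ih =>
      by_cases h10 : n < 10
      · have hp : pvPrefixLoopB n = n := by rw [pvPrefixLoopB.eq_def, dif_neg (by omega)]
        rw [pvToDigits_lt n h10, hp, if_pos h10]
        have hat : pvIntAtA [Nat.digitChar n] 0 = pvVal (Nat.digitChar n) := by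
          simp [pvIntAtA, pvVal, pysem]
        rw [hat, pvVal_digitChar n h10]
      · have hlt : n / 10 < n := Nat.div_lt_self (by omega) (by norm_num)
        have hpos : (0:Int) < (Nat.toDigits 10 (n/10)).length := by
          exact_mod_cast pvToDigits_len1 (n/10)
        rw [pvToDigits_step n (by omega),
            pvIntAtA_append_lt _ _ 0 (by norm_num) hpos, ih (n/10) hlt]
        refine congrArg (Nat.cast) ?_
        by_cases h100 : 100 ≤ n
        · conv_rhs => rw [pvPrefixLoopB.eq_def]
          rw [dif_pos h100]
        · have hpn : pvPrefixLoopB n = n := by rw [pvPrefixLoopB.eq_def, dif_neg h100]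
          have hpd : pvPrefixLoopB (n/10) = n / 10 := by
            rw [pvPrefixLoopB.eq_def, dif_neg (by omega)]
          rw [hpn, hpd, if_pos (show n / 10 < 10 by omega), if_neg h10]

lemma pvAmexN (p : Nat) : (([34, 37] : List Int).contains (p : Int) = true) ↔ (p = 34 ∨ p = 37) := by
  simp [List.contains_eq_mem]
  omega

lemma pvMcN (p : Nat) : (([51, 52, 53, 54, 55] : List Int).contains (p : Int) = true) ↔ (51 ≤ p ∧ p ≤ 55) := by
  simp [List.contains_eq_mem]
  omega

-- ===== VERDICT (by name: the statement is the Claim_ definition above) =====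
theorem prob5_spec : Claim_equal_prob5 := by
  intro numero _ hpre
  unfold Spec_prob5
  simp only [prob5, prob5_alt]
  rw [pvSuma_eq numero hpre, pvToChars_nonneg numero hpre,
      pvMsum_luhn numero.toNat 0 false (by decide)]
  by_cases hm : PySem.Int.mod (pvLuhnLoopB numero.toNat 0 false) 10 = 0
  · rw [if_pos hm, if_pos hm, pvFirstA numero.toNat, pvPrefixA numero.toNat]
    by_cases h4 : (if pvPrefixLoopB numero.toNat < 10 then pvPrefixLoopB numero.toNat
        else pvPrefixLoopB numero.toNat / 10) = 4
    · rw [if_pos (by exact_mod_cast h4), if_pos h4]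
    · rw [if_neg (fun hc => h4 (by exact_mod_cast hc)), if_neg h4]
      by_cases ha : pvPrefixLoopB numero.toNat = 34 ∨ pvPrefixLoopB numero.toNat = 37
      · rw [if_pos ((pvAmexN _).2 ha), if_pos ha]
      · rw [if_neg (fun hc => ha ((pvAmexN _).1 hc)), if_neg ha]
        by_cases hb : 51 ≤ pvPrefixLoopB numero.toNat ∧ pvPrefixLoopB numero.toNat ≤ 55
        · rw [if_pos ((pvMcN _).2 hb), if_pos hb]
        · rw [if_neg (fun hc => hb ((pvMcN _).1 hc)), if_neg hb]
  · rw [if_neg hm, if_neg hm]
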